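-- pv_equiv track=rewrite | github.com/punitkashyup/code-navigator | webhook-solution/src/code_splitter/utils.py | get_byte_offset
-- ===== SOURCE A (Python) =====
-- def get_byte_offset(line_num: int, source_lines: list[str]) -> int:
--     """
--     Calculate the byte offset for a line number.
--
--     Args:
--         line_num: The line number (0-based).
--         source_lines: The source code lines.
--
--     Returns:
--         The byte offset.
--     """
--     if line_num < 0:
--         return 0
--     offset = 0
--     for i in range(min(line_num, len(source_lines))):
--         offset += len(source_lines[i].encode('utf-8', errors='ignore'))
--         if i < len(source_lines) - 1:
--             offset += len('\n'.encode('utf-8'))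
--     return offset
-- ===== SOURCE B (Python) =====
-- def get_byte_offset(line_num: int, source_lines: list[str]) -> int:
--     if line_num < 0:
--         return 0
--     n = len(source_lines)
--     if line_num >= n:
--         return len('\n'.join(source_lines).encode('utf-8', errors='ignore'))
--     return (len('\n'.join(source_lines[:line_num + 1]).encode('utf-8', errors='ignore'))
--             - len(source_lines[line_num].encode('utf-8', errors='ignore')))
-- ===== Notes on version B (the rewrite author's own statement) =====
-- stated objective: alternative
-- what changed: Replaces the per-line accumulation loop with a conditional newline by a join-then-encode measurement: the byte offset is the encoded length of the '\n'-joined prefix minus the encoded length of the target line (or of the whole joined text when line_num >= len).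
import Mathlib
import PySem

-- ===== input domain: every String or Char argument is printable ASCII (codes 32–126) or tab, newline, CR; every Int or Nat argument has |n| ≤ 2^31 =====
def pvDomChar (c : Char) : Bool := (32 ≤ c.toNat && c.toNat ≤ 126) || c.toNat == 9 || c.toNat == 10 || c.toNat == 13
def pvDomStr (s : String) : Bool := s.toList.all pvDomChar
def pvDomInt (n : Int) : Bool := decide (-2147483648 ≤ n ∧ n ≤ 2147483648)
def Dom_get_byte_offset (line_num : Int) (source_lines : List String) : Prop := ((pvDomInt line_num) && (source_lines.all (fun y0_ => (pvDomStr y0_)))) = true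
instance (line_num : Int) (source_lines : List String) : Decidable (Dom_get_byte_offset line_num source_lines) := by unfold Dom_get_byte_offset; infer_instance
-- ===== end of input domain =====

-- B replaces A's per-line accumulation loop (with a conditional newline) by a join-then-encode
-- measurement: byte length of the '\n'-joined prefix minus the byte length of the target line.


-- ===== PORT A =====
-- len(s.encode('utf-8', errors='ignore')) is ported as PySem.Str.len s: exact on Dom, where every
-- admitted character (printable ASCII, tab, newline, CR) encodes to exactly one UTF-8 byte.
def get_byte_offset (line_num : Int) (source_lines : List String) : Int :=
  if line_num < 0 then 0
  else
    (PySem.List.pyRange 0 (min line_num (source_lines.length : Int)) 1).foldl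
      (fun offset i =>
        let offset := offset + PySem.Str.len (PySem.List.pyGetD source_lines i "")
        if i < (source_lines.length : Int) - 1 then offset + 1 else offset) 0

-- ===== PORT B =====
def get_byte_offset_alt (line_num : Int) (source_lines : List String) : Int :=
  if line_num < 0 then 0
  else
    let n : Int := source_lines.length
    if n ≤ line_num then
      PySem.Str.len (PySem.Str.join "\n" source_lines)
    else
      PySem.Str.len (PySem.Str.join "\n" (PySem.List.slice source_lines none (some (line_num + 1))))
        - PySem.Str.len (PySem.List.pyGetD source_lines line_num "")

-- ===== PRECONDITION & SPEC =====
def Spec_get_byte_offset (line_num : Int) (source_lines : List String) (out : Int) : Prop := out = get_byte_offset_alt line_num source_lines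
instance (line_num : Int) (source_lines : List String) (out : Int) : Decidable (Spec_get_byte_offset line_num source_lines out) := by unfold Spec_get_byte_offset; infer_instance

-- ===== CLAIM (what is proved, stated in full; the proofs are below) =====
def Claim_equal_get_byte_offset : Prop := ∀ (line_num : Int) (source_lines : List String), Dom_get_byte_offset line_num source_lines → Spec_get_byte_offset line_num source_lines (get_byte_offset line_num source_lines)

-- ===== LEMMAS AND PROOFS =====

-- byte length of the join of a nonempty list: sum of lengths plus one separator per gap
theorem join_len (x : String) (rest : List String) :
    ((PySem.Str.join "\n" (x :: rest)).toList.length : Int)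
      = (x.toList.length : Int)
        + (((rest.map (fun s => (s.toList.length : Int))).sum) + rest.length) := by
  induction rest generalizing x with
  | nil => simp [PySem.Str.toList_join, PySem.Chars.join, List.intercalate]
  | cons y r ih =>
      have h := ih y
      simp only [PySem.Str.toList_join, List.map_cons] at h ⊢
      rw [PySem.Chars.join_cons_cons]
      have hsep : ("\n".toList) = ['\n'] := rfl
      simp only [hsep, List.length_append, List.length_cons, List.length_nil,
        List.sum_cons] at h ⊢
      push_cast at h ⊢
      omega

-- the same, with the head folded into the sum
theorem join_len' (xs : List String) (h : xs ≠ []) :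
    ((PySem.Str.join "\n" xs).toList.length : Int)
      = ((xs.map (fun s => (s.toList.length : Int))).sum) + xs.length - 1 := by
  cases xs with
  | nil => exact absurd rfl h
  | cons x rest =>
      rw [join_len]
      simp only [List.map_cons, List.sum_cons, List.length_cons]
      push_cast
      ring

-- A's loop over range(m): sum of the first m line lengths plus min m (n-1) newlines
theorem foldA (ls : List String) (m : Nat) (hm : m ≤ ls.length) :
    (List.map (fun k : Nat => (k : Int)) (List.range m)).foldl
        (fun offset i =>
          let offset := offset + PySem.Str.len (PySem.List.pyGetD ls i "")
          if i < (ls.length : Int) - 1 then offset + 1 else offset) 0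
      = (((ls.take m).map (fun s => (s.toList.length : Int))).sum)
        + (min m (ls.length - 1) : Nat) := by
  induction m with
  | zero => simp
  | succ m ih =>
      have hm' : m ≤ ls.length := by omega
      have hlt : m < ls.length := by omega
      rw [List.range_succ, List.map_append, List.foldl_append, ih hm']
      have hget : PySem.List.pyGetD ls (m : Int) "" = ls[m] := by
        rw [PySem.List.pyGetD_natCast, List.getD_eq_getElem ls "" hlt]
      have htake : ls.take (m + 1) = ls.take m ++ [ls[m]] := by
        rw [List.take_add_one]
        simp [List.getElem?_eq_getElem hlt]
      rw [htake]
      simp only [List.map_singleton, List.foldl_cons, List.foldl_nil, List.map_append,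
        List.sum_append, List.map_singleton, List.sum_cons, List.sum_nil, hget,
        PySem.Str.len_eq]
      split_ifs with h
      · have : min (m + 1) (ls.length - 1) = min m (ls.length - 1) + 1 := by omega
        rw [this]; push_cast; ring
      · have h1 : ls.length - 1 ≤ m := by omega
        have : min (m + 1) (ls.length - 1) = min m (ls.length - 1) := by omega
        rw [this]; push_cast; ring

-- ===== VERDICT (by name: the statement is the Claim_ definition above) =====
theorem get_byte_offset_spec : Claim_equal_get_byte_offset := by
  intro line_num ls _
  show get_byte_offset line_num ls = get_byte_offset_alt line_num ls
  unfold get_byte_offset get_byte_offset_alt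
  by_cases hneg : line_num < 0
  · simp [hneg]
  · rw [if_neg hneg, if_neg hneg]
    have h0 : 0 ≤ line_num := by omega
    by_cases hge : (ls.length : Int) ≤ line_num
    · -- line_num >= len: min = len; A sums everything, B measures the full join
      have hmin : min line_num (ls.length : Int) = (ls.length : Int) := by omega
      rw [hmin, PySem.List.pyRange_zero_natCast, foldA ls ls.length le_rfl, if_pos hge,
        List.take_length]
      cases ls with
      | nil => simp [PySem.Str.join, PySem.Chars.join, List.intercalate, PySem.Str.len_eq]
      | cons x rest =>
          rw [PySem.Str.len_eq, join_len']
          · simp only [List.length_cons]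
            push_cast
            omega
          · exact List.cons_ne_nil x rest
    · -- 0 <= line_num < len
      have hlt : line_num < (ls.length : Int) := by omega
      have hm : line_num = ((line_num.toNat : Nat) : Int) := by omega
      set m : Nat := line_num.toNat with hmdef
      have hmlt : m < ls.length := by omega
      have hmin : min line_num (ls.length : Int) = ((m : Nat) : Int) := by omega
      rw [hmin, PySem.List.pyRange_zero_natCast, foldA ls m (by omega), if_neg hge]
      have hsl : PySem.List.slice ls none (some (line_num + 1)) = ls.take (m + 1) := by
        have : line_num + 1 = ((m + 1 : Nat) : Int) := by omega
        rw [this, PySem.List.slice_to_natCast]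
      have hget : PySem.List.pyGetD ls line_num "" = ls[m] := by
        rw [hm, PySem.List.pyGetD_natCast, List.getD_eq_getElem ls "" hmlt]
      rw [hsl, hget, PySem.Str.len_eq, PySem.Str.len_eq, join_len' _ (by
        intro h
        have := congrArg List.length h
        simp [Nat.min_eq_left (by omega : m + 1 ≤ ls.length)] at this)]
      have hlen : (ls.take (m + 1)).length = m + 1 :=
        List.length_take_of_le (by omega)
      have hsum2 : ((ls.take (m + 1)).map (fun s => (s.toList.length : Int))).sum
          = ((ls.take m).map (fun s => (s.toList.length : Int))).sum + (ls[m].toList.length : Int) := by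
        have hL : m < (ls.map (fun s => (s.toList.length : Int))).length := by simpa using hmlt
        simpa using List.sum_take_succ (ls.map (fun s => (s.toList.length : Int))) m hL
      have hmn : min m (ls.length - 1) = m := by omega
      rw [hlen, hsum2, hmn]
      push_cast
      ring
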